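-- pv_equiv track=rewrite | github.com/hon99oo/PythonAlgorithmStudy | BOJ/문자열/1316_그룹 단어 체커/solution.py | solution
-- ===== SOURCE A (Python) =====
-- def solution(string):
--     length = len(string)
--     for i in range(length):
--         flag = False
--         for j in range(i+1, length):
--             if string[i] != string[j]:
--                 flag = True
--             if string[i] == string[j] and flag:
--                 return False
--     return True
-- ===== SOURCE B (Python) =====
-- def solution(string):
--     seen = set()
--     prev = None
--     for ch in string:
--         if ch != prev:
--             if ch in seen:
--                 return False
--             seen.add(ch)
--             prev = ch
--     return True
-- ===== Notes on version B (the rewrite author's own statement) =====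
-- stated objective: faster
-- what changed: Replaces the quadratic double loop over index pairs with a single pass that keeps a set of characters already seen and the previous character, failing when a character reappears after a break in its run.
import Mathlib
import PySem

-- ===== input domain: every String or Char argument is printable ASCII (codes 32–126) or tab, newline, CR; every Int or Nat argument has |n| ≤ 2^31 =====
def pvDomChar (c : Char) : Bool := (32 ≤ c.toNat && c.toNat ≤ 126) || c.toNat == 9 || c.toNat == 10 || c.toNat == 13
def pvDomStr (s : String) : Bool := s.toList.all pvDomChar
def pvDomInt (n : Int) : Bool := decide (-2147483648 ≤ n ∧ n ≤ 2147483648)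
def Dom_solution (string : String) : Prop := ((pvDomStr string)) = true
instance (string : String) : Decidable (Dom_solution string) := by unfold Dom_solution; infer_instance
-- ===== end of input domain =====

-- B replaces A's quadratic double index loop by a single pass keeping a seen-set and the previous character (asymptotically faster).

-- ===== PORT A =====
-- inner loop 'for j in range(i+1, length)' with the mutable 'flag', early return False ⇒ result false
def solInner (ci : Char) (flag : Bool) : List Char → Bool
  | [] => true
  | c :: cs =>
    let flag' := if ci ≠ c then true else flag
    if ci = c ∧ flag' = true then false else solInner ci flag' cs

-- outer loop 'for i in range(length)': string[i] is the head of the current suffix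
def solOuter : List Char → Bool
  | [] => true
  | c :: cs => if solInner c false cs = false then false else solOuter cs

def solution (string : String) : Bool := solOuter string.toList

-- ===== PORT B =====
def altGo (seen : PySem.Set Char) (prev : Option Char) : List Char → Bool
  | [] => true
  | c :: cs =>
    if some c ≠ prev then
      if PySem.Set.contains seen c then false
      else altGo (PySem.Set.add seen c) (some c) cs
    else altGo seen prev cs

def solution_alt (string : String) : Bool := altGo PySem.Set.empty none string.toList

-- ===== PRECONDITION & SPEC =====
def Spec_solution (string : String) (out : Bool) : Prop := out = solution_alt string
instance (string : String) (out : Bool) : Decidable (Spec_solution string out) := by unfold Spec_solution; infer_instance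

-- ===== CLAIM (what is proved, stated in full; the proofs are below) =====
def Claim_equal_solution : Prop := ∀ (string : String), Dom_solution string → Spec_solution string (solution string)

-- ===== LEMMAS AND PROOFS =====

-- A returns False iff some character reappears after a different character: [a, b, a] with a ≠ b is a sublist.
def Bad (l : List Char) : Prop := ∃ a b, a ≠ b ∧ [a, b, a].Sublist l

-- the character that is "prev" after processing v starting from prev = p
def prevAfter (p : Option Char) : List Char → Option Char
  | [] => p
  | c :: v => prevAfter (some c) v

-- B returns False iff some character differs from its predecessor yet already occurred before.
def Adj (l : List Char) : Prop := ∃ v c w, l = v ++ c :: w ∧ some c ≠ prevAfter none v ∧ c ∈ v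

lemma prevAfter_eq (v : List Char) : ∀ p, prevAfter p v = v.getLast?.or p := by
  induction v with
  | nil => intro p; rfl
  | cons c v ih =>
    intro p
    show prevAfter (some c) v = (c :: v).getLast?.or p
    rw [ih (some c)]
    cases v with
    | nil => rfl
    | cons d v' =>
      rw [List.getLast?_cons_cons]
      cases h : (d :: v').getLast? with
      | none => exact absurd (List.getLast?_eq_none_iff.mp h) (by simp)
      | some x => rfl

lemma pair_sublist_cons (b c d : Char) (cs : List Char) :
    [b, c].Sublist (d :: cs) ↔ [b, c].Sublist cs ∨ (b = d ∧ c ∈ cs) := by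
  rw [List.sublist_cons_iff]
  constructor
  · rintro (h | ⟨r, hr, hs⟩)
    · exact Or.inl h
    · cases hr
      exact Or.inr ⟨rfl, List.singleton_sublist.mp hs⟩
  · rintro (h | ⟨rfl, hc⟩)
    · exact Or.inl h
    · exact Or.inr ⟨[c], rfl, List.singleton_sublist.mpr hc⟩

lemma solInner_false (ci : Char) (cs : List Char) : ∀ flag,
    (solInner ci flag cs = false ↔ (flag = true ∧ ci ∈ cs) ∨ ∃ b, b ≠ ci ∧ [b, ci].Sublist cs) := by
  induction cs with
  | nil =>
    intro flag
    simp only [solInner]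
    constructor
    · intro h; cases h
    · rintro (⟨_, h⟩ | ⟨b, _, h⟩)
      · cases h
      · exact absurd (List.eq_nil_of_sublist_nil h) (by simp)
  | cons d cs ih =>
    intro flag
    by_cases hcd : ci = d
    · subst hcd
      cases flag with
      | true => simp [solInner]
      | false =>
        simp only [solInner]
        norm_num
        rw [ih false]
        simp only [Bool.false_eq_true, false_and, false_or]
        constructor
        · rintro ⟨b, hb, hs⟩
          exact ⟨b, hb, hs.cons _⟩
        · rintro ⟨b, hb, hs⟩
          rcases (pair_sublist_cons b ci ci cs).mp hs with h | ⟨rfl, _⟩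
          · exact ⟨b, hb, h⟩
          · exact absurd rfl hb
    · have hne : ci ≠ d := hcd
      simp only [solInner, if_pos hne]
      rw [if_neg (by simp [hcd] : ¬ (ci = d ∧ True)), ih true]
      constructor
      · rintro (⟨_, hm⟩ | ⟨b, hb, hs⟩)
        · exact Or.inr ⟨d, fun h => hcd h.symm, (pair_sublist_cons d ci d cs).mpr (Or.inr ⟨rfl, hm⟩)⟩
        · exact Or.inr ⟨b, hb, hs.cons _⟩
      · rintro (⟨hf, hm⟩ | ⟨b, hb, hs⟩)
        · rcases List.mem_cons.mp hm with h | h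
          · exact absurd h hcd
          · exact Or.inl ⟨rfl, h⟩
        · rcases (pair_sublist_cons b ci d cs).mp hs with h | ⟨rfl, hm⟩
          · exact Or.inr ⟨b, hb, h⟩
          · exact Or.inl ⟨rfl, hm⟩

lemma bad_cons (c : Char) (cs : List Char) :
    Bad (c :: cs) ↔ (∃ b, b ≠ c ∧ [b, c].Sublist cs) ∨ Bad cs := by
  constructor
  · rintro ⟨a, b, hab, hs⟩
    rcases List.sublist_cons_iff.mp hs with h | ⟨r, hr, hrs⟩
    · exact Or.inr ⟨a, b, hab, h⟩
    · cases hr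
      exact Or.inl ⟨b, fun h => hab h.symm, hrs⟩
  · rintro (⟨b, hb, hs⟩ | ⟨a, b, hab, hs⟩)
    · exact ⟨c, b, fun h => hb h.symm, List.cons_sublist_cons.mpr hs⟩
    · exact ⟨a, b, hab, hs.cons _⟩

lemma solOuter_false (l : List Char) : solOuter l = false ↔ Bad l := by
  induction l with
  | nil =>
    simp only [solOuter, Bad]
    constructor
    · intro h; cases h
    · rintro ⟨a, b, _, h⟩
      exact absurd (List.eq_nil_of_sublist_nil h) (by simp)
  | cons c cs ih =>
    simp only [solOuter]
    rw [bad_cons]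
    by_cases h : solInner c false cs = false
    · simp only [if_pos h, true_iff]
      rcases (solInner_false c cs false).mp h with ⟨h1, _⟩ | hb
      · cases h1
      · exact Or.inl hb
    · simp only [if_neg h]
      rw [ih]
      constructor
      · exact Or.inr
      · rintro (hb | hb)
        · exact absurd ((solInner_false c cs false).mpr (Or.inr hb)) h
        · exact hb

-- first-occurrence split
lemma first_split {a : Char} {l : List Char} (h : a ∈ l) :
    ∃ q1 q2, l = q1 ++ a :: q2 ∧ a ∉ q1 := by
  induction l with
  | nil => cases h
  | cons d l ih =>
    by_cases hda : d = a
    · exact ⟨[], l, by simp [hda], by simp⟩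
    · rcases List.mem_cons.mp h with h' | h'
      · exact absurd h'.symm hda
      · obtain ⟨q1, q2, rfl, hq⟩ := ih h'
        refine ⟨d :: q1, q2, rfl, ?_⟩
        intro hmem
        rcases List.mem_cons.mp hmem with h2 | h2
        · exact hda h2.symm
        · exact hq h2

lemma mem_of_getLast? {x : Char} {l : List Char} (h : l.getLast? = some x) : x ∈ l := by
  have := List.dropLast_append_getLast? x (by rw [h]; rfl)
  rw [← this]
  simp

lemma bad_iff_adj (l : List Char) : Bad l ↔ Adj l := by
  constructor
  · rintro ⟨a, b, hab, hs⟩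
    rcases List.cons_sublist_iff.mp hs with ⟨r₁, r₂, rfl, ha, hs₂⟩
    rcases List.cons_sublist_iff.mp hs₂ with ⟨s₁, s₂, rfl, hb, hs₃⟩
    obtain ⟨p, p', rfl⟩ := List.append_of_mem hb
    have ha2 : a ∈ p' ++ s₂ := by
      have := List.singleton_sublist.mp hs₃
      simp [this]
    obtain ⟨q1, q2, hq, hnq⟩ := first_split ha2
    refine ⟨r₁ ++ (p ++ b :: q1), a, q2, ?_, ?_, by simp [ha]⟩
    · simp [List.append_assoc, ← hq]
    · rw [prevAfter_eq]
      simp only [Option.or_none]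
      rw [← List.append_assoc, List.getLast?_append_cons]
      intro hlast
      have hmem : a ∈ b :: q1 := mem_of_getLast? hlast.symm
      rcases List.mem_cons.mp hmem with h | h
      · exact hab h
      · exact hnq h
  · rintro ⟨v, c, w, rfl, hne, hcv⟩
    rw [prevAfter_eq, Option.or_none] at hne
    have hvne : v ≠ [] := by rintro rfl; cases hcv
    obtain ⟨b, hb⟩ : ∃ b, v.getLast? = some b := by
      cases hv : v.getLast? with
      | none => exact absurd (List.getLast?_eq_none_iff.mp hv) hvne
      | some b => exact ⟨b, rfl⟩
    have hcb : c ≠ b := by intro h; rw [hb, h] at hne; exact hne rfl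
    have hdrop : c ∈ v.dropLast :=
      List.mem_dropLast_of_mem_of_ne_getLast? hcv (by rw [hb]; simpa using hcb)
    have hv : v.dropLast ++ [b] = v := List.dropLast_append_getLast? b hb
    refine ⟨c, b, hcb, ?_⟩
    have h1 : [c].Sublist v.dropLast := List.singleton_sublist.mpr hdrop
    have h2 : ([c] ++ [b]).Sublist (v.dropLast ++ [b]) := h1.append (List.Sublist.refl _)
    rw [hv] at h2
    have h3 : ([c] ++ [b] ++ [c]).Sublist (v ++ c :: w) :=
      h2.append (List.singleton_sublist.mpr (List.mem_cons_self))
    simpa using h3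

lemma altGo_false (cs : List Char) : ∀ (seen : PySem.Set Char) (prev : Option Char),
    (∀ x, prev = some x → x ∈ seen) →
    (altGo seen prev cs = false ↔
      ∃ v c w, cs = v ++ c :: w ∧ some c ≠ prevAfter prev v ∧ (c ∈ seen ∨ c ∈ v)) := by
  induction cs with
  | nil =>
    intro seen prev _
    simp only [altGo]
    constructor
    · intro h; cases h
    · rintro ⟨v, c, w, hv, -, -⟩
      exact absurd hv (by simp)
  | cons d cs ih =>
    intro seen prev hinv
    by_cases hp : some d = prev
    · simp only [altGo, if_neg (not_not_intro hp)]
      rw [ih seen prev hinv]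
      constructor
      · rintro ⟨v, c, w, rfl, hne, hm⟩
        exact ⟨d :: v, c, w, rfl, by simpa [prevAfter, hp] using hne,
          Or.elim hm Or.inl (fun h => Or.inr (List.mem_cons_of_mem _ h))⟩
      · rintro ⟨v, c, w, hv, hne, hm⟩
        cases v with
        | nil =>
          simp only [List.nil_append] at hv
          injection hv with h1 h2
          subst h1
          exact absurd hp (by simpa [prevAfter] using hne)
        | cons e v' =>
          injection hv with h1 h2
          subst h1
          refine ⟨v', c, w, h2, ?_, ?_⟩
          · show some c ≠ prevAfter prev v'
            have : prevAfter (some d) v' = prevAfter prev v' := by rw [hp]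
            rw [← this]
            exact hne
          · rcases hm with h | h
            · exact Or.inl h
            · rcases List.mem_cons.mp h with h' | h'
              · subst h'; exact Or.inl (hinv c hp.symm)
              · exact Or.inr h'
    · by_cases hmem : d ∈ seen
      · simp only [altGo, if_pos hp, if_pos ((PySem.Set.contains_iff seen d).mpr hmem)]
        constructor
        · intro _
          exact ⟨[], d, cs, rfl, by simpa [prevAfter] using hp, Or.inl hmem⟩
        · intro _
          trivial
      · have hcont : PySem.Set.contains seen d = false := by
          cases h : PySem.Set.contains seen d
          · rfl
          · exact absurd ((PySem.Set.contains_iff seen d).mp h) hmem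
        simp only [altGo, if_pos hp, hcont, Bool.false_eq_true, if_neg not_false]
        rw [ih (PySem.Set.add seen d) (some d)
          (by intro x hx; injection hx with hx; subst hx
              exact (PySem.Set.mem_add seen d d).mpr (Or.inr rfl))]
        constructor
        · rintro ⟨v, c, w, rfl, hne, hm⟩
          refine ⟨d :: v, c, w, rfl, hne, ?_⟩
          rcases hm with h | h
          · rcases (PySem.Set.mem_add _ _ _).mp h with h' | h'
            · exact Or.inl h'
            · subst h'; exact Or.inr List.mem_cons_self
          · exact Or.inr (List.mem_cons_of_mem _ h)
        · rintro ⟨v, c, w, hv, hne, hm⟩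
          cases v with
          | nil =>
            simp only [List.nil_append] at hv
            injection hv with h1 h2
            subst h1
            rcases hm with h | h
            · exact absurd h hmem
            · cases h
          | cons e v' =>
            injection hv with h1 h2
            subst h1
            refine ⟨v', c, w, h2, hne, ?_⟩
            rcases hm with h | h
            · exact Or.inl ((PySem.Set.mem_add _ _ _).mpr (Or.inl h))
            · rcases List.mem_cons.mp h with h' | h'
              · exact Or.inl ((PySem.Set.mem_add _ _ _).mpr (Or.inr h'))
              · exact Or.inr h'

lemma alt_false_iff_adj (l : List Char) : altGo PySem.Set.empty none l = false ↔ Adj l := by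
  rw [altGo_false l PySem.Set.empty none (by intro x h; cases h)]
  unfold Adj
  constructor
  · rintro ⟨v, c, w, hv, hne, hm⟩
    refine ⟨v, c, w, hv, hne, ?_⟩
    rcases hm with h | h
    · cases h
    · exact h
  · rintro ⟨v, c, w, hv, hne, hm⟩
    exact ⟨v, c, w, hv, hne, Or.inr hm⟩

lemma solution_eq_alt (s : String) : solution s = solution_alt s := by
  unfold solution solution_alt
  have h : (solOuter s.toList = false) ↔ (altGo PySem.Set.empty none s.toList = false) := by
    rw [solOuter_false, alt_false_iff_adj, bad_iff_adj]
  cases hA : solOuter s.toList <;> cases hB : altGo PySem.Set.empty none s.toList <;>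
    simp_all

-- ===== VERDICT (by name: the statement is the Claim_ definition above) =====
theorem solution_spec : Claim_equal_solution := by
  intro s _
  unfold Spec_solution
  exact solution_eq_alt s
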